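-- pv_equiv track=rewrite | github.com/noam-buc/Password_generator | test/test_password_generator.py | signs_check
-- ===== SOURCE A (Python) =====
-- signs = "!@#$%^&*()"
--
-- def signs_check(password):
--     cnt = 0
--     for i in range(len(signs)):
--         if signs[i] in password:
--             password = list(password)
--             password.remove(signs[i])
--             cnt += 1
--     if cnt == 2:
--         return True
--     else:
--         return False
-- ===== SOURCE B (Python) =====
-- signs = "!@#$%^&*()"
--
-- def signs_check(password):
--     return len(set(password) & set(signs)) == 2
-- ===== Notes on version B (the rewrite author's own statement) =====
-- stated objective: simpler
-- what changed: Replaced the 10-iteration loop with per-sign membership test, in-place character removal and a running counter by one set intersection: len(set(password) & set(signs)) == 2.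
import Mathlib
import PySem

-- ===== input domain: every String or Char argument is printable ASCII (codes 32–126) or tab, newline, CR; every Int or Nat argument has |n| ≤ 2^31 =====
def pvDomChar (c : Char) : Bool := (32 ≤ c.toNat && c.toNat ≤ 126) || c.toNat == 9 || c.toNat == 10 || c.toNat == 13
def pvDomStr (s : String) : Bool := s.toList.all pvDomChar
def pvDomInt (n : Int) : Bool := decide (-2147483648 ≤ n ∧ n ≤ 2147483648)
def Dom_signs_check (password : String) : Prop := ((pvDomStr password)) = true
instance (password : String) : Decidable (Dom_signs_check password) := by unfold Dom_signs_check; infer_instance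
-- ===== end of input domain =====

-- B replaces A's loop over the 10 signs (membership test + in-place removal + counter)
-- by one set intersection: len(set(password) & set(signs)) == 2 — simpler, same result.

-- ===== PORT A =====
-- module-level constant: signs = "!@#$%^&*()"
def pvSigns : List Char := "!@#$%^&*()".toList

-- one loop body: 'if signs[i] in password: password = list(password); password.remove(signs[i]); cnt += 1'
-- ('c in password' for a 1-character string equals character membership — exact here)
def signsStep (st : List Char × Int) (c : Char) : List Char × Int :=
  if st.1.contains c then ((PySem.List.remove? st.1 c).getD st.1, st.2 + 1) else st

def signs_check (password : String) : Bool :=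
  if (pvSigns.foldl signsStep (password.toList, (0 : Int))).2 = 2 then true else false

-- ===== PORT B =====
def signs_check_alt (password : String) : Bool :=
  PySem.Set.len (PySem.Set.inter (PySem.Set.ofList password.toList) (PySem.Set.ofList pvSigns)) == 2

-- ===== PRECONDITION & SPEC =====
def Spec_signs_check (password : String) (out : Bool) : Prop := out = signs_check_alt password
instance (password : String) (out : Bool) : Decidable (Spec_signs_check password out) := by unfold Spec_signs_check; infer_instance

-- ===== CLAIM (what is proved, stated in full; the proofs are below) =====
def Claim_equal_signs_check : Prop := ∀ (password : String), Dom_signs_check password → Spec_signs_check password (signs_check password)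

-- ===== LEMMAS AND PROOFS =====

-- the loop only ever removes the sign just counted, so later membership tests are unchanged:
-- the final counter counts the distinct signs present in the original password
lemma signs_loop_cnt (ss : List Char) (chars : List Char) (cnt : Int) (h : ss.Nodup) :
    (ss.foldl signsStep (chars, cnt)).2
      = cnt + ((ss.filter (fun c => chars.contains c)).length : Int) := by
  induction ss generalizing chars cnt with
  | nil => simp
  | cons c ss ih =>
    rcases List.nodup_cons.mp h with ⟨hc_not, hss⟩
    by_cases hc : chars.contains c
    · have hmem : c ∈ chars := by simpa using hc
      have hrem : (PySem.List.remove? chars c).getD chars = chars.erase c := by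
        rw [PySem.List.remove?_eq_some_erase chars c hmem]; rfl
      have hfs : ss.filter (fun d => (chars.erase c).contains d)
               = ss.filter (fun d => chars.contains d) := by
        apply List.filter_congr
        intro d hd
        have hne : d ≠ c := fun e => hc_not (e ▸ hd)
        by_cases hdm : d ∈ chars <;>
          simp [hdm, List.mem_erase_of_ne hne]
      simp only [List.foldl_cons, signsStep, hc, if_pos, hrem]
      rw [ih _ _ hss, hfs, List.filter_cons_of_pos hc]
      simp only [List.length_cons]
      push_cast
      ring
    · have hcm : c ∉ chars := by simpa using hc
      simp only [List.foldl_cons, signsStep, hc, if_neg, Bool.false_eq_true,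
        not_false_iff]
      rw [ih _ _ hss]
      simp [List.filter_cons, hcm]

-- the two filtered lists (signs present in password, in signs order vs. distinct password
-- chars that are signs) have the same members and no duplicates, hence the same length
lemma filter_lengths_eq (pw : List Char) :
    ((pvSigns.filter (fun c => pw.contains c)).length : Int)
      = PySem.Set.len (PySem.Set.inter (PySem.Set.ofList pw) (PySem.Set.ofList pvSigns)) := by
  have h1 : (pvSigns.filter (fun c => pw.contains c)).Nodup :=
    List.Nodup.filter _ (by decide)
  have h2 : ((PySem.Set.ofList pw).filter (fun x => (PySem.Set.ofList pvSigns).contains x)).Nodup :=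
    List.Nodup.filter _ (PySem.Set.nodup_ofList pw)
  have hperm : (pvSigns.filter (fun c => pw.contains c)).Perm
      ((PySem.Set.ofList pw).filter (fun x => (PySem.Set.ofList pvSigns).contains x)) := by
    rw [List.perm_ext_iff_of_nodup h1 h2]
    intro a
    simp [List.mem_filter, PySem.Set.mem_ofList, And.comm]
  show ((pvSigns.filter (fun c => pw.contains c)).length : Int) = _
  unfold PySem.Set.len PySem.Set.inter
  rw [hperm.length_eq]

-- 'if x = 2 then true else false' is the boolean test x == 2
lemma ite_eq_beq_two (x : Int) : (if x = 2 then true else false) = (x == 2) := by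
  by_cases h : x = 2 <;> simp [h]

-- ===== VERDICT (by name: the statement is the Claim_ definition above) =====
theorem signs_check_spec : Claim_equal_signs_check := by
  intro password _
  unfold Spec_signs_check signs_check signs_check_alt
  rw [signs_loop_cnt pvSigns password.toList 0 (by decide)]
  rw [zero_add, filter_lengths_eq]
  exact ite_eq_beq_two _
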